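-- pv_equiv track=rewrite | github.com/arXiv/arxiv-references | reflink/process/inject/latexinjector.py | remove_repeated_words
-- ===== SOURCE A (Python) =====
-- def remove_repeated_words(docs):
--     """
--     For purposes of comparing perhaps only partially cleaned bibitems, we remove
--     words that are shared amongst all items so that they don't bias the jacard
--     similarity score.
--
--     Parameters
--     ----------
--     docs : list of str
--
--     Returns
--     -------
--     modified_docs : list of str
--         Strings with common words removed
--     """
--     # get a list of common words
--     common = None
--     for doc in docs:
--         if common is None:
--             common = set(doc.split())
--         else:
--             common.intersection_update(set(doc.split()))
--
--     # remove the words from the strings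
--     newdocs = []
--     for doc in docs:
--         newdoc = ' '.join([
--             w for w in doc.split() if w not in common
--         ])
--         newdocs.append(newdoc)
--     return newdocs
-- ===== SOURCE B (Python) =====
-- def remove_repeated_words(docs):
--     # Count, for each word, how many docs contain it; a word common to all
--     # docs is one whose containment count equals len(docs).
--     counts = {}
--     for doc in docs:
--         for w in set(doc.split()):
--             counts[w] = counts.get(w, 0) + 1
--     common = {w for w, c in counts.items() if c == len(docs)}
--     return [' '.join(w for w in doc.split() if w not in common) for doc in docs]
-- ===== Notes on version B (the rewrite author's own statement) =====
-- stated objective: idiomatic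
-- what changed: Replaces the iterative intersection_update shrinking of the common-word set by a single count-table pass (word -> number of docs containing it) filtered at c == len(docs), and fuses the rewrite loop into a list comprehension.
import Mathlib
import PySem

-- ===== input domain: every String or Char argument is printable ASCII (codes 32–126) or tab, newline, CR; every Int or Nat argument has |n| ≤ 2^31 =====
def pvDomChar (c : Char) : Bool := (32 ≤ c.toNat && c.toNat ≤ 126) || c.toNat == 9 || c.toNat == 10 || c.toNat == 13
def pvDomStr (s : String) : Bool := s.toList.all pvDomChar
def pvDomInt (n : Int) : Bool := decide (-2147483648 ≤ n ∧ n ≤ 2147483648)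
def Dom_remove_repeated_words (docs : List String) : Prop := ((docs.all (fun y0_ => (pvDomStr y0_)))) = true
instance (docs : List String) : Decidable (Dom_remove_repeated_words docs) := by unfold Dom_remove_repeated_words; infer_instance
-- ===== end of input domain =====

-- B replaces A's iterative set-intersection shrinking of `common` by a one-pass containment
-- count table (word -> number of docs containing it) filtered at len(docs); objective: idiomatic/alternative.


-- ===== PORT A =====
def remove_repeated_words (docs : List String) : List String :=
  -- common = None; for doc in docs: intersect (first doc initialises)
  let common : Option (PySem.Set String) :=
    docs.foldl (fun common doc =>
      match common with
      | none => some (PySem.Set.ofList (PySem.Str.split₀ doc))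
      | some s => some (PySem.Set.inter s (PySem.Set.ofList (PySem.Str.split₀ doc)))) none
  -- second loop; the `none` arm of the membership test is unreachable (the loop body only
  -- runs when docs is nonempty, and then common is some): `false` merely totalises it
  docs.foldl (fun newdocs doc =>
    newdocs ++ [PySem.Str.join " " ((PySem.Str.split₀ doc).filter (fun w =>
      !(match common with
        | some s => PySem.Set.contains s w
        | none => false)))]) []

-- ===== PORT B =====
def remove_repeated_words_alt (docs : List String) : List String :=
  let counts : PySem.Dict String Int :=
    docs.foldl (fun counts doc =>
      (PySem.Set.ofList (PySem.Str.split₀ doc)).foldl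
        (fun counts w => counts.insert w (counts.getD w 0 + 1)) counts) PySem.Dict.empty
  let common : PySem.Set String :=
    PySem.Set.ofList ((counts.items.filter (fun p => p.2 == (docs.length : Int))).map Prod.fst)
  docs.map (fun doc =>
    PySem.Str.join " " ((PySem.Str.split₀ doc).filter (fun w => !(PySem.Set.contains common w))))

-- ===== PRECONDITION & SPEC =====
def Spec_remove_repeated_words (docs : List String) (out : List String) : Prop := out = remove_repeated_words_alt docs
instance (docs : List String) (out : List String) : Decidable (Spec_remove_repeated_words docs out) := by unfold Spec_remove_repeated_words; infer_instance

-- ===== CLAIM (what is proved, stated in full; the proofs are below) =====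
def Claim_equal_remove_repeated_words : Prop := ∀ (docs : List String), Dom_remove_repeated_words docs → Spec_remove_repeated_words docs (remove_repeated_words docs)

-- ===== LEMMAS AND PROOFS =====

-- the multiset of "doc word sets" B counts over
def pvFlatWords (docs : List String) : List String :=
  docs.flatMap (fun d => PySem.Set.ofList (PySem.Str.split₀ d))

theorem pvCountsB_eq_counter (docs : List String) :
    docs.foldl (fun counts doc =>
      (PySem.Set.ofList (PySem.Str.split₀ doc)).foldl
        (fun counts w => counts.insert w (counts.getD w 0 + 1)) counts) PySem.Dict.empty
    = PySem.Dict.counter (pvFlatWords docs) := by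
  rw [← PySem.Dict.foldl_insert_getD_add_one_eq_counter, pvFlatWords, List.foldl_flatMap]

theorem pvMem_flatWords (docs : List String) (w : String) :
    w ∈ pvFlatWords docs ↔ ∃ d ∈ docs, w ∈ PySem.Str.split₀ d := by
  simp [pvFlatWords, PySem.Set.mem_ofList]

theorem pvCount_flatWords (docs : List String) (w : String) :
    (pvFlatWords docs).count w
      = docs.countP (fun d => decide (w ∈ PySem.Str.split₀ d)) := by
  induction docs with
  | nil => rfl
  | cons d ds ih =>
    rw [pvFlatWords, List.flatMap_cons, List.count_append, ← pvFlatWords, ih,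
        List.countP_cons]
    by_cases h : w ∈ PySem.Str.split₀ d
    · simp [h, Nat.add_comm]
    · have hm : w ∉ PySem.Set.ofList (PySem.Str.split₀ d) := by
        simp [PySem.Set.mem_ofList, h]
      simp [List.count_eq_zero_of_not_mem hm, h]

-- membership in B's `common`
theorem pvMem_commonB (docs : List String) (w : String) :
    w ∈ PySem.Set.ofList
        (((PySem.Dict.counter (pvFlatWords docs)).items.filter
            (fun p => p.2 == (docs.length : Int))).map Prod.fst)
      ↔ w ∈ pvFlatWords docs ∧ (pvFlatWords docs).count w = docs.length := by
  simp only [PySem.Set.mem_ofList, List.mem_map, List.mem_filter,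
    PySem.Dict.items_counter]
  constructor
  · rintro ⟨a, ⟨⟨k, hk, rfl⟩, heq⟩, hfst⟩
    simp only [beq_iff_eq, Int.natCast_inj] at heq
    cases hfst
    exact ⟨hk, heq⟩
  · rintro ⟨hmem, hcnt⟩
    exact ⟨(w, ((pvFlatWords docs).count w : Int)), ⟨⟨w, hmem, rfl⟩, by simp [hcnt]⟩, rfl⟩

-- A's option-valued fold, once started
theorem pvAfold_some (ds : List String) (s : PySem.Set String) :
    ds.foldl (fun common doc =>
      match common with
      | none => some (PySem.Set.ofList (PySem.Str.split₀ doc))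
      | some s => some (PySem.Set.inter s (PySem.Set.ofList (PySem.Str.split₀ doc))))
      (some s)
    = some (ds.foldl (fun s doc => PySem.Set.inter s (PySem.Set.ofList (PySem.Str.split₀ doc))) s) := by
  induction ds generalizing s with
  | nil => rfl
  | cons d ds ih => simpa using ih _

theorem pvAfold_cons (d : String) (ds : List String) :
    (d :: ds).foldl (fun common doc =>
      match common with
      | none => some (PySem.Set.ofList (PySem.Str.split₀ doc))
      | some s => some (PySem.Set.inter s (PySem.Set.ofList (PySem.Str.split₀ doc)))) none
    = some (ds.foldl (fun s doc => PySem.Set.inter s (PySem.Set.ofList (PySem.Str.split₀ doc)))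
        (PySem.Set.ofList (PySem.Str.split₀ d))) := by
  simpa using pvAfold_some ds (PySem.Set.ofList (PySem.Str.split₀ d))

theorem pvMem_interFold (ds : List String) (s : PySem.Set String) (w : String) :
    w ∈ ds.foldl (fun s doc => PySem.Set.inter s (PySem.Set.ofList (PySem.Str.split₀ doc))) s
      ↔ w ∈ s ∧ ∀ d ∈ ds, w ∈ PySem.Str.split₀ d := by
  induction ds generalizing s with
  | nil => simp
  | cons d ds ih =>
    simp only [List.foldl_cons, ih, PySem.Set.mem_inter, PySem.Set.mem_ofList,
      List.forall_mem_cons]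
    tauto

theorem pvMain (docs : List String) :
    remove_repeated_words docs = remove_repeated_words_alt docs := by
  cases docs with
  | nil => rfl
  | cons d ds =>
    unfold remove_repeated_words remove_repeated_words_alt
    rw [pvAfold_cons, pvCountsB_eq_counter,
        PySem.List.foldl_append_singleton_eq_map]
    simp only [List.nil_append]
    apply List.map_congr_left
    intro doc hdoc
    congr 1
    apply List.filter_congr
    intro w hw
    congr 1
    rw [Bool.eq_iff_iff, PySem.Set.contains_iff, PySem.Set.contains_iff,
        pvMem_interFold, pvMem_commonB, PySem.Set.mem_ofList]
    constructor
    · rintro ⟨h0, hall⟩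
      have hallc : ∀ d' ∈ d :: ds, w ∈ PySem.Str.split₀ d' :=
        (List.forall_mem_cons).mpr ⟨h0, hall⟩
      refine ⟨(pvMem_flatWords _ _).mpr ⟨doc, hdoc, hw⟩, ?_⟩
      rw [pvCount_flatWords]
      exact List.countP_eq_length.mpr (fun a ha => by simpa using hallc a ha)
    · rintro ⟨-, hcnt⟩
      rw [pvCount_flatWords] at hcnt
      have hallc := List.countP_eq_length.mp hcnt
      have : ∀ d' ∈ d :: ds, w ∈ PySem.Str.split₀ d' := fun a ha => by
        simpa using hallc a ha
      exact ⟨this d (by simp), fun a ha => this a (by simp [ha])⟩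

-- ===== VERDICT (by name: the statement is the Claim_ definition above) =====
theorem remove_repeated_words_spec : Claim_equal_remove_repeated_words := by
  intro docs _
  unfold Spec_remove_repeated_words
  exact pvMain docs
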